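-- pv_equiv track=rewrite | github.com/JamesVonRaj/tda-particle-correlations | scripts/4_visualization/visualize_cycle_choices.py | find_all_simple_cycles
-- ===== SOURCE A (Python) =====
-- def find_all_simple_cycles(graph, v1, v2, max_length=10):
--     """
--     Find all simple cycles that include edge (v1, v2).
--     Uses DFS to find all paths from v1 to v2 not using that edge.
--     """
--     cycles = []
--
--     def dfs(current, target, path, visited):
--         if len(path) > max_length:
--             return
--         if current == target and len(path) > 1:
--             cycles.append(path.copy())
--             return
--         for neighbor in graph[current]:
--             if neighbor not in visited or (neighbor == target and len(path) > 1):
--                 if neighbor == target and len(path) > 1: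
--                     cycles.append(path + [neighbor])
--                 elif neighbor not in visited:
--                     visited.add(neighbor)
--                     path.append(neighbor)
--                     dfs(neighbor, target, path, visited)
--                     path.pop()
--                     visited.remove(neighbor)
--
--     # Remove the edge (v1, v2) from consideration
--     original_v1_neighbors = graph[v1].copy()
--     original_v2_neighbors = graph[v2].copy()
--     if v2 in graph[v1]:
--         graph[v1].remove(v2)
--     if v1 in graph[v2]:
--         graph[v2].remove(v1)
--
--     # Find all paths from v1 to v2
--     dfs(v1, v2, [v1], {v1})
--
--     # Restore edges
--     graph[v1] = original_v1_neighbors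
--     graph[v2] = original_v2_neighbors
--
--     return cycles
-- ===== SOURCE B (Python) =====
-- def find_all_simple_cycles(graph, v1, v2, max_length=10):
--     """
--     Find all simple cycles that include edge (v1, v2).
--     Iterative DFS with an explicit stack of (node, next-neighbor-index) frames;
--     works on a copy of the neighbor lists, so the input graph is never mutated.
--     """
--     cycles = []
--     nbrs = {k: list(v) for k, v in graph.items()}
--     if v2 in nbrs[v1]:
--         nbrs[v1].remove(v2)
--     if v1 in nbrs[v2]:
--         nbrs[v2].remove(v1)
--     path = [v1]
--     visited = {v1}
--     if len(path) > max_length: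
--         return cycles
--     stack = [(v1, 0)]
--     while stack:
--         node, i = stack[-1]
--         ns = nbrs[node]
--         if i >= len(ns):
--             stack.pop()
--             path.pop()
--             visited.discard(node)
--             continue
--         stack[-1] = (node, i + 1)
--         n = ns[i]
--         if n == v2 and len(path) > 1:
--             cycles.append(path + [n])
--         elif n not in visited:
--             if len(path) + 1 > max_length:
--                 continue
--             if n == v2:
--                 cycles.append(path + [n])
--             else:
--                 stack.append((n, 0))
--                 path.append(n)
--                 visited.add(n)
--     return cycles
-- ===== Notes on version B (the rewrite author's own statement) =====
-- stated objective: alternative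
-- what changed: The recursive backtracking DFS with shared mutable path/visited/cycles (and in-place edge removal on the caller's graph) is replaced by an iterative DFS over an explicit stack of (node, next-neighbor-index) frames driving one while-loop, operating on a copied adjacency map so the input is never mutated.
import Mathlib
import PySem

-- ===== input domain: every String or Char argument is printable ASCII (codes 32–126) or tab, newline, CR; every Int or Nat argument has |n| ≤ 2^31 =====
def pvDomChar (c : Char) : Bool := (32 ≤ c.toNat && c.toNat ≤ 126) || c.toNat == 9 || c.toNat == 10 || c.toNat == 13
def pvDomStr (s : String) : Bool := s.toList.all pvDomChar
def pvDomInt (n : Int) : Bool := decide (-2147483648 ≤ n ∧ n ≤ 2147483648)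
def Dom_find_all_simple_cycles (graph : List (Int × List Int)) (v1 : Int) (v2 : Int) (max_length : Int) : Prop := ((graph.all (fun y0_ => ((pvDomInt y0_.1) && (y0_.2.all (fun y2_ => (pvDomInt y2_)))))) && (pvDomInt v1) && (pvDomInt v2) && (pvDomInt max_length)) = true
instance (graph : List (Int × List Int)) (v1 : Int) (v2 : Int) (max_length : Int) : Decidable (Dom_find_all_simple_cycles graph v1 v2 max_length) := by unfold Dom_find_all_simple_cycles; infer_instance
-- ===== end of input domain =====

-- B replaces A's recursive mutate-and-backtrack DFS by an explicit-stack iterative DFS on a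
-- copied adjacency map (same return value; A temporarily mutates the caller's dict and restores
-- it before returning — B never mutates it; only the return value is compared here).

-- ===== PORT A =====
-- A's recursive dfs: the mutable `cycles` list is the threaded accumulator; `path`/`visited`
-- are passed functionally, so Python's append/pop and add/remove around the recursive call are
-- the unchanged `path`/`visited` after the call.  `fuel` is a totality guard only: the length
-- check `len(path) > max_length` makes Python's recursion depth ≤ max_length+1, and with
-- fuel = max_length.toNat + 2 the fuel-0 branch is never reached.
def pvDfs (g : PySem.Dict Int (List Int)) (target : Int) (max_length : Int) :
    Nat → Int → List Int → PySem.Set Int → List (List Int) → List (List Int)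
  | 0, _, _, _, cycles => cycles
  | fuel+1, current, path, visited, cycles =>
    if max_length < (path.length : Int) then cycles
    else if current = target ∧ 1 < path.length then cycles ++ [path]
    else (g.getD current []).foldl
      (fun cyc n =>
        if n ∉ visited ∨ (n = target ∧ 1 < path.length) then
          if n = target ∧ 1 < path.length then cyc ++ [path ++ [n]]
          else if n ∉ visited then
            pvDfs g target max_length fuel n (path ++ [n]) (PySem.Set.add visited n) cyc
          else cyc
        else cyc) cycles

-- graph[v1].remove(v2) / graph[v2].remove(v1), guarded by membership (Pre_ gives v1, v2 ∈ keys;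
-- `insert` of an existing key overwrites in place, exactly Python's in-place list mutation).
-- The final restore of the two neighbor lists is omitted: it only undoes the mutation and does
-- not affect the return value.
def find_all_simple_cycles (graph : List (Int × List Int)) (v1 : Int) (v2 : Int) (max_length : Int) : List (List Int) :=
  let g0 : PySem.Dict Int (List Int) := PySem.Dict.mk graph
  let g1 := if v2 ∈ g0.getD v1 [] then g0.insert v1 ((PySem.List.remove? (g0.getD v1 []) v2).getD (g0.getD v1 [])) else g0
  let g2 := if v1 ∈ g1.getD v2 [] then g1.insert v2 ((PySem.List.remove? (g1.getD v2 []) v1).getD (g1.getD v2 [])) else g1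
  pvDfs g2 v2 max_length (max_length.toNat + 2) v1 [v1] (PySem.Set.ofList [v1]) []

-- ===== PORT B =====
-- Source B's while-loop over the explicit stack of (node, next-neighbor-index) frames.
-- pvFuel is a totality guard only (Python's `while stack:` needs none): the stack depth is
-- bounded by the number of distinct neighbor values and each frame takes ≤ maxdeg+1 turns,
-- so pvFuel g steps always suffice (proved in the lemmas below).
def pvM (g : PySem.Dict Int (List Int)) : Nat := g.items.foldl (fun a p => max a p.2.length) 0
def pvVals (g : PySem.Dict Int (List Int)) : List Int := PySem.Set.ofList (g.items.flatMap (fun p => p.2))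
def pvFuel (g : PySem.Dict Int (List Int)) : Nat := (pvM g + 2) ^ ((pvVals g).length + 3)

def pvLoop (g : PySem.Dict Int (List Int)) (target : Int) (max_length : Int) :
    Nat → List (Int × Nat) → List Int → PySem.Set Int → List (List Int) → List (List Int)
  | 0, _, _, _, cycles => cycles
  | fuel+1, stack, path, visited, cycles =>
    match stack with
    | [] => cycles
    | (node, i) :: rest =>
      let ns := g.getD node []
      if h : i < ns.length then
        let n := ns[i]
        if n = target ∧ 1 < path.length then
          pvLoop g target max_length fuel ((node, i+1) :: rest) path visited (cycles ++ [path ++ [n]])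
        else if n ∉ visited then
          if max_length < (path.length : Int) + 1 then
            pvLoop g target max_length fuel ((node, i+1) :: rest) path visited cycles
          else if n = target then
            pvLoop g target max_length fuel ((node, i+1) :: rest) path visited (cycles ++ [path ++ [n]])
          else
            pvLoop g target max_length fuel ((n, 0) :: (node, i+1) :: rest) (path ++ [n]) (PySem.Set.add visited n) cycles
        else pvLoop g target max_length fuel ((node, i+1) :: rest) path visited cycles
      else pvLoop g target max_length fuel rest path.dropLast (PySem.Set.discard visited node) cycles

def find_all_simple_cycles_alt (graph : List (Int × List Int)) (v1 : Int) (v2 : Int) (max_length : Int) : List (List Int) :=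
  let g0 : PySem.Dict Int (List Int) := PySem.Dict.mk graph
  let g1 := if v2 ∈ g0.getD v1 [] then g0.insert v1 ((PySem.List.remove? (g0.getD v1 []) v2).getD (g0.getD v1 [])) else g0
  let g2 := if v1 ∈ g1.getD v2 [] then g1.insert v2 ((PySem.List.remove? (g1.getD v2 []) v1).getD (g1.getD v2 [])) else g1
  if max_length < (1 : Int) then []
  else pvLoop g2 v2 max_length (pvFuel g2) [(v1, 0)] [v1] (PySem.Set.ofList [v1]) []

-- ===== PRECONDITION & SPEC =====
-- nodes the DFS can look up: BFS closure from v1 (v2 is entered but never expanded; v1 is,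
-- also when v1 = v2), depth-capped by max_length (push needs path length ≤ max_length),
-- graph.length + 1 iterations reach the fixpoint
def pvReach (graph : List (Int × List Int)) (v1 : Int) (v2 : Int) (max_length : Int) : List Int :=
  (fun s => PySem.Set.update s
      ((graph.filter (fun p => p.1 ∈ s ∧ (p.1 = v1 ∨ p.1 ≠ v2))).flatMap (fun p => p.2)))^[
    min (max_length.toNat - 1) (graph.length + 1)] (PySem.Set.ofList [v1])

-- Pre_ excludes exactly the inputs on which the Python raises KeyError (v1 or v2 not a key, or a
-- non-key node within the DFS's reach), plus association lists with duplicate keys, which do not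
-- represent a Python dict.
def Pre_find_all_simple_cycles (graph : List (Int × List Int)) (v1 : Int) (v2 : Int) (max_length : Int) : Prop :=
  (graph.map Prod.fst).Nodup ∧ v1 ∈ graph.map Prod.fst ∧ v2 ∈ graph.map Prod.fst ∧
    (max_length < 1 ∨ ∀ x ∈ pvReach graph v1 v2 max_length, x = v2 ∨ x ∈ graph.map Prod.fst)
instance (graph : List (Int × List Int)) (v1 : Int) (v2 : Int) (max_length : Int) : Decidable (Pre_find_all_simple_cycles graph v1 v2 max_length) := by unfold Pre_find_all_simple_cycles; infer_instance

def pvWitness_find_all_simple_cycles : (List (Int × List Int)) × Int × Int × Int :=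
  ([(0, [1, 2]), (1, [0, 2]), (2, [0, 1])], 0, 1, 10)

def Spec_find_all_simple_cycles (graph : List (Int × List Int)) (v1 : Int) (v2 : Int) (max_length : Int) (out : List (List Int)) : Prop := out = find_all_simple_cycles_alt graph v1 v2 max_length
instance (graph : List (Int × List Int)) (v1 : Int) (v2 : Int) (max_length : Int) (out : List (List Int)) : Decidable (Spec_find_all_simple_cycles graph v1 v2 max_length out) := by unfold Spec_find_all_simple_cycles; infer_instance

-- ===== CLAIM (what is proved, stated in full; the proofs are below) =====
def Claim_equal_find_all_simple_cycles : Prop := ∀ (graph : List (Int × List Int)) (v1 : Int) (v2 : Int) (max_length : Int), Dom_find_all_simple_cycles graph v1 v2 max_length → Pre_find_all_simple_cycles graph v1 v2 max_length → Spec_find_all_simple_cycles graph v1 v2 max_length (find_all_simple_cycles graph v1 v2 max_length)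

-- ===== LEMMAS AND PROOFS =====

-- the per-neighbor body of A's dfs loop, child calls at fuel f
def pvStep (g : PySem.Dict Int (List Int)) (target max_length : Int) (f : Nat)
    (path : List Int) (visited : PySem.Set Int) : List (List Int) → Int → List (List Int) :=
  fun cyc n =>
    if n ∉ visited ∨ (n = target ∧ 1 < path.length) then
      if n = target ∧ 1 < path.length then cyc ++ [path ++ [n]]
      else if n ∉ visited then
        pvDfs g target max_length f n (path ++ [n]) (PySem.Set.add visited n) cyc
      else cyc
    else cyc

theorem pvDfs_succ (g : PySem.Dict Int (List Int)) (t m : Int) (f : Nat) (cur : Int)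
    (path : List Int) (vis : PySem.Set Int) (cyc : List (List Int)) :
    pvDfs g t m (f+1) cur path vis cyc =
      if m < (path.length : Int) then cyc
      else if cur = t ∧ 1 < path.length then cyc ++ [path]
      else (g.getD cur []).foldl (pvStep g t m f path vis) cyc := rfl

-- number of "fresh" candidate nodes: distinct neighbor values not yet visited
def pvD (g : PySem.Dict Int (List Int)) (vis : PySem.Set Int) : Nat :=
  ((pvVals g).filter (fun x => decide (x ∉ vis))).length

theorem pv_filter_lt (l : List Int) (p q : Int → Bool) (himp : ∀ x ∈ l, q x = true → p x = true)
    (x : Int) (hx : x ∈ l) (hpx : p x = true) (hqx : q x = false) :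
    (l.filter q).length < (l.filter p).length := by
  induction l with
  | nil => cases hx
  | cons a t ih =>
    have hle : (t.filter q).length ≤ (t.filter p).length := by
      simpa [← List.countP_eq_length_filter] using
        List.countP_mono_left (p := q) (q := p) (fun y hy => himp y (List.mem_cons_of_mem _ hy))
    simp only [List.filter_cons]
    rcases List.mem_cons.mp hx with rfl | hxt
    · rw [hqx, hpx]; simp; omega
    · have hlt := ih (fun y hy => himp y (List.mem_cons_of_mem _ hy)) hxt
      cases hqa : q a <;> cases hpa : p a <;> simp <;> try omega
      · exact absurd (himp a List.mem_cons_self hqa) (by simp [hpa])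

theorem pv_getD_len_le (g : PySem.Dict Int (List Int)) (node : Int) :
    (g.getD node []).length ≤ pvM g := by
  unfold PySem.Dict.getD PySem.Dict.get?
  cases hfind : List.find? (fun p => p.1 == node) g.items with
  | none => simp [pvM]
  | some p =>
    have hp : p ∈ g.items := List.mem_of_find?_eq_some hfind
    simpa [pvM] using (PySem.List.le_foldl_max_nat g.items (fun p => p.2.length) 0).2 p hp

theorem pv_mem_vals (g : PySem.Dict Int (List Int)) {node n : Int}
    (h : n ∈ g.getD node []) : n ∈ pvVals g := by
  unfold pvVals
  rw [PySem.Set.mem_ofList]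
  unfold PySem.Dict.getD PySem.Dict.get? at h
  cases hfind : List.find? (fun p => p.1 == node) g.items with
  | none => rw [hfind] at h; simp at h
  | some p =>
    rw [hfind] at h
    exact List.mem_flatMap.mpr ⟨p, List.mem_of_find?_eq_some hfind, by simpa using h⟩

theorem pvD_le (g : PySem.Dict Int (List Int)) (vis : PySem.Set Int) :
    pvD g vis ≤ (pvVals g).length := List.length_filter_le _ _

theorem pvD_add_lt (g : PySem.Dict Int (List Int)) {vis : PySem.Set Int} {n : Int}
    (hnv : n ∉ vis) (hval : n ∈ pvVals g) :
    pvD g (PySem.Set.add vis n) < pvD g vis := by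
  unfold pvD
  refine pv_filter_lt _ _ _ ?_ n hval (by simpa using hnv) ?_
  · intro x _ hq
    simp only [decide_eq_true_eq] at hq ⊢
    intro hxv
    refine hq ?_
    unfold PySem.Set.add
    split
    · exact hxv
    · exact List.mem_append_left _ hxv
  · rw [decide_eq_false_iff_not, not_not]
    unfold PySem.Set.add
    split
    · rename_i h; exact absurd (by simpa [PySem.Set.contains] using h) hnv
    · exact List.mem_append_right _ List.mem_cons_self

theorem pv_discard_add {vis : PySem.Set Int} {n : Int} (hnv : n ∉ vis) :
    PySem.Set.discard (PySem.Set.add vis n) n = vis := by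
  unfold PySem.Set.discard PySem.Set.add PySem.Set.contains
  rw [if_neg (by simpa using hnv)]
  rw [List.filter_append, List.filter_eq_self.mpr, List.filter_cons]
  · simp
  · intro y hy; simp; rintro rfl; exact hnv hy

theorem pvLoop_nil (g : PySem.Dict Int (List Int)) (t m : Int) (f : Nat)
    (path : List Int) (vis : PySem.Set Int) (cyc : List (List Int)) :
    pvLoop g t m f [] path vis cyc = cyc := by cases f <;> rfl

-- the simulation: one stack frame (node, i) runs A's neighbor loop from index i and then pops
theorem pv_sim (g : PySem.Dict Int (List Int)) (t m : Int) :
    ∀ fc : Nat, ∀ (node : Int) (i : Nat) (path : List Int) (vis : PySem.Set Int) (cyc : List (List Int)),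
      1 ≤ path.length →
      (path.length : Int) ≤ m →
      m + 1 ≤ (path.length : Int) + (fc : Int) →
      ∃ k ≤ ((g.getD node []).length - i) * ((pvM g + 2) ^ (pvD g vis + 1) + 1) + 1,
        ∀ (f : Nat) (rest : List (Int × Nat)),
          pvLoop g t m (k + f) ((node, i) :: rest) path vis cyc
            = pvLoop g t m f rest path.dropLast (PySem.Set.discard vis node)
                (((g.getD node []).drop i).foldl (pvStep g t m fc path vis) cyc) := by
  intro fc
  induction fc with
  | zero =>
    intro node i path vis cyc hp h1 h2
    exfalso; push_cast at h2; omega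
  | succ fc ih =>
    intro node i path vis cyc hp h1 h2
    have inner : ∀ j : Nat, ∀ (i : Nat) (cyc : List (List Int)), (g.getD node []).length ≤ i + j →
        ∃ k ≤ j * ((pvM g + 2) ^ (pvD g vis + 1) + 1) + 1,
          ∀ (f : Nat) (rest : List (Int × Nat)),
            pvLoop g t m (k + f) ((node, i) :: rest) path vis cyc
              = pvLoop g t m f rest path.dropLast (PySem.Set.discard vis node)
                  (((g.getD node []).drop i).foldl (pvStep g t m (fc+1) path vis) cyc) := by
      intro j
      induction j with
      | zero =>
        intro i cyc hlen
        refine ⟨1, by omega, ?_⟩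
        intro f rest
        rw [show 1 + f = f + 1 by omega]
        simp only [pvLoop]
        rw [dif_neg (by omega)]
        rw [List.drop_eq_nil_of_le (by omega)]
        rfl
      | succ j ihj =>
        intro i cyc hlen
        by_cases hi : i < (g.getD node []).length
        case neg =>
          refine ⟨1, by omega, ?_⟩
          intro f rest
          rw [show 1 + f = f + 1 by omega]
          simp only [pvLoop]
          rw [dif_neg hi]
          rw [List.drop_eq_nil_of_le (by omega)]
          rfl
        case pos =>
          have hdrop : (g.getD node []).drop i = (g.getD node [])[i] :: (g.getD node []).drop (i+1) :=
            List.drop_eq_getElem_cons hi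
          set n := (g.getD node [])[i] with hn
          have hBpos : 1 ≤ (pvM g + 2) ^ (pvD g vis + 1) + 1 := by omega
          have hmul : (j+1) * ((pvM g + 2) ^ (pvD g vis + 1) + 1) + 1
              = j * ((pvM g + 2) ^ (pvD g vis + 1) + 1) + ((pvM g + 2) ^ (pvD g vis + 1) + 1) + 1 := by ring
          by_cases hnt : n = t ∧ 1 < path.length
          · obtain ⟨k', hk', heq⟩ := ihj (i+1) (cyc ++ [path ++ [n]]) (by omega)
            refine ⟨k' + 1, by rw [hmul]; omega, ?_⟩
            intro f rest
            rw [show k' + 1 + f = (k' + f) + 1 by omega]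
            simp only [pvLoop]
            rw [dif_pos hi, if_pos hnt, heq f rest, hdrop, List.foldl_cons]
            congr 2
            simp [pvStep, hnt]
          · by_cases hnv : n ∈ vis
            · obtain ⟨k', hk', heq⟩ := ihj (i+1) cyc (by omega)
              refine ⟨k' + 1, by rw [hmul]; omega, ?_⟩
              intro f rest
              rw [show k' + 1 + f = (k' + f) + 1 by omega]
              simp only [pvLoop]
              rw [dif_pos hi, if_neg hnt, if_neg (by simpa using hnv), heq f rest, hdrop, List.foldl_cons]
              congr 2
              simp [pvStep, hnt, hnv]
            · by_cases hml : m < (path.length : Int) + 1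
              · obtain ⟨k', hk', heq⟩ := ihj (i+1) cyc (by omega)
                refine ⟨k' + 1, by rw [hmul]; omega, ?_⟩
                intro f rest
                rw [show k' + 1 + f = (k' + f) + 1 by omega]
                simp only [pvLoop]
                rw [dif_pos hi, if_neg hnt, if_pos hnv, if_pos hml, heq f rest, hdrop, List.foldl_cons]
                congr 2
                have hstep : pvStep g t m (fc+1) path vis cyc n
                    = pvDfs g t m (fc+1) n (path ++ [n]) (PySem.Set.add vis n) cyc := by
                  simp [pvStep, hnt, hnv]
                rw [hstep, pvDfs_succ, if_pos (by simp only [List.length_append, List.length_singleton]; push_cast; omega)]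
              · by_cases hnt2 : n = t
                · obtain ⟨k', hk', heq⟩ := ihj (i+1) (cyc ++ [path ++ [n]]) (by omega)
                  refine ⟨k' + 1, by rw [hmul]; omega, ?_⟩
                  intro f rest
                  rw [show k' + 1 + f = (k' + f) + 1 by omega]
                  simp only [pvLoop]
                  rw [dif_pos hi, if_neg hnt, if_pos hnv, if_neg hml, if_pos hnt2, heq f rest, hdrop, List.foldl_cons]
                  congr 2
                  have hstep : pvStep g t m (fc+1) path vis cyc n
                      = pvDfs g t m (fc+1) n (path ++ [n]) (PySem.Set.add vis n) cyc := by
                    simp [pvStep, hnt, hnv]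
                  rw [hstep, pvDfs_succ, if_neg (by simp only [List.length_append, List.length_singleton]; push_cast; omega),
                    if_pos (And.intro hnt2 (by simp only [List.length_append, List.length_singleton]; omega))]
                · -- push a child frame
                  have hmem : n ∈ g.getD node [] := hn ▸ List.getElem_mem hi
                  have hDlt : pvD g (PySem.Set.add vis n) < pvD g vis :=
                    pvD_add_lt g hnv (pv_mem_vals g hmem)
                  obtain ⟨kc, hkc, heqc⟩ := ih n 0 (path ++ [n]) (PySem.Set.add vis n) cyc
                    (by simp) (by simp only [List.length_append, List.length_singleton]; push_cast; omega)
                    (by simp only [List.length_append, List.length_singleton]; push_cast at h2 ⊢; omega)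
                  have hchild : (g.getD n []).foldl (pvStep g t m fc (path ++ [n]) (PySem.Set.add vis n)) cyc
                      = pvDfs g t m (fc+1) n (path ++ [n]) (PySem.Set.add vis n) cyc := by
                    rw [pvDfs_succ, if_neg (by simp only [List.length_append, List.length_singleton]; push_cast; omega),
                      if_neg (by rintro ⟨rfl, -⟩; exact hnt2 rfl)]
                  obtain ⟨k', hk', heq⟩ := ihj (i+1)
                    (pvDfs g t m (fc+1) n (path ++ [n]) (PySem.Set.add vis n) cyc) (by omega)
                  have hkcX : kc ≤ (pvM g + 2) ^ (pvD g vis + 1) := by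
                    have h1' : (g.getD n []).length ≤ pvM g := pv_getD_len_le g n
                    have h2' : (pvM g + 2) ^ (pvD g (PySem.Set.add vis n) + 1) ≤ (pvM g + 2) ^ (pvD g vis) :=
                      Nat.pow_le_pow_right (by omega) (by omega)
                    have h3' : pvM g + 2 ≤ (pvM g + 2) ^ (pvD g vis) :=
                      le_trans (le_of_eq (pow_one _).symm) (Nat.pow_le_pow_right (by omega) (by omega))
                    calc kc ≤ ((g.getD n []).length - 0) * ((pvM g + 2) ^ (pvD g (PySem.Set.add vis n) + 1) + 1) + 1 := hkc
                      _ ≤ pvM g * ((pvM g + 2) ^ (pvD g vis) + 1) + 1 := by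
                          apply Nat.add_le_add_right
                          exact Nat.mul_le_mul (by omega) (by omega)
                      _ = pvM g * (pvM g + 2) ^ (pvD g vis) + pvM g + 1 := by ring
                      _ ≤ pvM g * (pvM g + 2) ^ (pvD g vis) + (pvM g + 2) ^ (pvD g vis) := by omega
                      _ = (pvM g + 1) * (pvM g + 2) ^ (pvD g vis) := by ring
                      _ ≤ (pvM g + 2) * (pvM g + 2) ^ (pvD g vis) := Nat.mul_le_mul_right _ (by omega)
                      _ = (pvM g + 2) ^ (pvD g vis + 1) := by rw [pow_succ]; ring
                  refine ⟨1 + kc + k', by rw [hmul]; omega, ?_⟩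
                  intro f rest
                  rw [show 1 + kc + k' + f = (kc + (k' + f)) + 1 by omega]
                  simp only [pvLoop]
                  rw [dif_pos hi, if_neg hnt, if_pos hnv, if_neg hml, if_neg hnt2]
                  rw [heqc (k' + f) ((node, i+1) :: rest)]
                  rw [List.dropLast_concat, pv_discard_add hnv, List.drop_zero, hchild]
                  rw [heq f rest, hdrop, List.foldl_cons]
                  congr 2
                  simp [pvStep, hnv, hnt2]
    obtain ⟨k, hk, heq⟩ := inner ((g.getD node []).length - i) i cyc (by omega)
    exact ⟨k, by omega, heq⟩

theorem pv_main (g : PySem.Dict Int (List Int)) (t m : Int) (v1 : Int) :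
    pvDfs g t m (m.toNat + 2) v1 [v1] (PySem.Set.ofList [v1]) [] =
      (if m < (1 : Int) then []
       else pvLoop g t m (pvFuel g) [(v1, 0)] [v1] (PySem.Set.ofList [v1]) []) := by
  have hofl : (PySem.Set.ofList [v1] : PySem.Set Int) = [v1] := by
    simp [PySem.Set.ofList, PySem.Set.add, PySem.Set.empty, PySem.Set.contains]
  rw [hofl]
  rw [show m.toNat + 2 = (m.toNat + 1) + 1 from rfl, pvDfs_succ]
  by_cases hm : m < (1 : Int)
  · rw [if_pos (by simpa using hm), if_pos hm]
  · rw [if_neg (by simpa using hm), if_neg (by simp), if_neg hm]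
    obtain ⟨k, hk, heq⟩ := pv_sim g t m (m.toNat + 1) v1 0 [v1] [v1] []
      (by simp) (by simp; omega)
      (by simp only [List.length_singleton]; push_cast; rw [Int.toNat_of_nonneg (by omega : (0:Int) ≤ m)]; omega)
    have hkF : k ≤ pvFuel g := by
      have hlen : (g.getD v1 []).length ≤ pvM g := pv_getD_len_le g v1
      have hD : (pvM g + 2) ^ (pvD g [v1] + 1) ≤ (pvM g + 2) ^ ((pvVals g).length + 1) :=
        Nat.pow_le_pow_right (by omega) (by have := pvD_le g [v1]; omega)
      have hZ : pvM g + 2 ≤ (pvM g + 2) ^ ((pvVals g).length + 1) :=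
        le_trans (le_of_eq (pow_one _).symm) (Nat.pow_le_pow_right (by omega) (by omega))
      calc k ≤ ((g.getD v1 []).length - 0) * ((pvM g + 2) ^ (pvD g [v1] + 1) + 1) + 1 := hk
        _ ≤ pvM g * ((pvM g + 2) ^ ((pvVals g).length + 1) + 1) + 1 := by
            apply Nat.add_le_add_right
            exact Nat.mul_le_mul (by omega) (by omega)
        _ = pvM g * (pvM g + 2) ^ ((pvVals g).length + 1) + pvM g + 1 := by ring
        _ ≤ pvM g * (pvM g + 2) ^ ((pvVals g).length + 1) + (pvM g + 2) ^ ((pvVals g).length + 1) := by omega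
        _ = (pvM g + 1) * (pvM g + 2) ^ ((pvVals g).length + 1) := by ring
        _ ≤ ((pvM g + 2) * (pvM g + 2)) * (pvM g + 2) ^ ((pvVals g).length + 1) :=
            Nat.mul_le_mul_right _ (by nlinarith)
        _ = (pvM g + 2) ^ ((pvVals g).length + 3) := by rw [pow_succ, pow_succ]; ring
        _ = pvFuel g := rfl
    have := heq (pvFuel g - k) []
    rw [Nat.add_sub_cancel' hkF] at this
    rw [this, pvLoop_nil, List.drop_zero]

-- ===== VERDICT (by name: the statement is the Claim_ definition above) =====
theorem find_all_simple_cycles_spec : Claim_equal_find_all_simple_cycles := by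
  intro graph v1 v2 max_length _ _
  unfold Spec_find_all_simple_cycles find_all_simple_cycles find_all_simple_cycles_alt
  exact pv_main _ v2 max_length v1
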